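-- pv_equiv track=rewrite | github.com/PinjarPeerBasha/anomaly_detection | Final Anomaly Detector Project/Final Anomaly Detector Project/anamoly_detection.py | classify_log
-- ===== SOURCE A (Python) =====
-- def classify_log(message):
--     """
--     Classifies log entries as SYSTEM or SECURITY alerts with severity.
--     """
--     message_lower = message.lower()
--
--     # SECURITY-related messages
--     if any(keyword in message_lower for keyword in ['unauthorized access', 'failed login', 'hijacking', 'brute-force', 'ransomware', 'port scan', 'suspicious','authentication failed']):
--         if 'critical' in message_lower or 'ransomware' in message_lower or 'port scan' in message_lower:
--             severity = "CRITICAL"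
--         else:
--             severity = "MEDIUM"
--         return "SECURITY ALERT", severity
--
--     # SYSTEM-related messages
--     if any(keyword in message_lower for keyword in ['disk usage', 'kernel panic', 'application crashed', 'cpu usage', 'deadlock', 'timeout', 'ssl', 'latency']):
--         if 'critical' in message_lower or 'kernel panic' in message_lower:
--             severity = "CRITICAL"
--         else:
--             severity = "MEDIUM"
--         return "SYSTEM ALERT", severity
--
--     return None, None
-- ===== SOURCE B (Python) =====
-- # Flat keyword table: (keyword, is_security_keyword, is_critical_trigger)
-- KEYWORDS = [
--     ('unauthorized access', True, False),
--     ('failed login', True, False),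
--     ('hijacking', True, False),
--     ('brute-force', True, False),
--     ('ransomware', True, True),
--     ('port scan', True, True),
--     ('suspicious', True, False),
--     ('authentication failed', True, False),
--     ('disk usage', False, False),
--     ('kernel panic', False, True),
--     ('application crashed', False, False),
--     ('cpu usage', False, False),
--     ('deadlock', False, False),
--     ('timeout', False, False),
--     ('ssl', False, False),
--     ('latency', False, False),
-- ]
--
--
-- def classify_log(message):
--     ml = message.lower()
--     sec = sysm = sec_crit = sys_crit = False
--     for kw, is_sec, trig in KEYWORDS:
--         hit = kw in ml
--         sec = sec or (is_sec and hit)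
--         sysm = sysm or (not is_sec and hit)
--         sec_crit = sec_crit or (is_sec and trig and hit)
--         sys_crit = sys_crit or (not is_sec and trig and hit)
--     crit = 'critical' in ml
--     if sec:
--         return "SECURITY ALERT", "CRITICAL" if crit or sec_crit else "MEDIUM"
--     if sysm:
--         return "SYSTEM ALERT", "CRITICAL" if crit or sys_crit else "MEDIUM"
--     return None, None
-- ===== Notes on version B (the rewrite author's own statement) =====
-- stated objective: alternative
-- what changed: Replaced A's two staged any()-blocks with early returns by one pass over a flat keyword table that accumulates four boolean flags (security/system hit and their critical triggers), with the classification decided once at the end from the flags.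
import Mathlib
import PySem

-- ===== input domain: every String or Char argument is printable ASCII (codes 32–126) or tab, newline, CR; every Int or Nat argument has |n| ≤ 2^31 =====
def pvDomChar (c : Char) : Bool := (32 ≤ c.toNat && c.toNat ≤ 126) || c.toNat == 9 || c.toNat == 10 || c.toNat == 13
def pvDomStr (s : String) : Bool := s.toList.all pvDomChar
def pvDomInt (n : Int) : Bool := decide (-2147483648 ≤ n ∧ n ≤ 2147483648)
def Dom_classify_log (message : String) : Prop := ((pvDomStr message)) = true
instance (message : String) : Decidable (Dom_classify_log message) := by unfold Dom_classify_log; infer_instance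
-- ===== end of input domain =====

-- B: one pass over a flat keyword table accumulating boolean flags, decision at the end (alternative decomposition; same behaviour).

-- ===== PORT A =====
def classify_log (message : String) : Option String × Option String :=
  let message_lower := PySem.Str.lower message
  if ["unauthorized access", "failed login", "hijacking", "brute-force", "ransomware",
      "port scan", "suspicious", "authentication failed"].any
        (fun keyword => PySem.Str.isIn keyword message_lower) then
    let severity : String :=
      if PySem.Str.isIn "critical" message_lower || PySem.Str.isIn "ransomware" message_lower
          || PySem.Str.isIn "port scan" message_lower then "CRITICAL" else "MEDIUM"
    (some "SECURITY ALERT", some severity)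
  else if ["disk usage", "kernel panic", "application crashed", "cpu usage", "deadlock",
           "timeout", "ssl", "latency"].any
             (fun keyword => PySem.Str.isIn keyword message_lower) then
    let severity : String :=
      if PySem.Str.isIn "critical" message_lower || PySem.Str.isIn "kernel panic" message_lower
        then "CRITICAL" else "MEDIUM"
    (some "SYSTEM ALERT", some severity)
  else (none, none)

-- ===== PORT B =====
-- flat table: (keyword, is_security_keyword, is_critical_trigger)
def pvKeywords : List (String × Bool × Bool) :=
  [("unauthorized access", true, false), ("failed login", true, false),
   ("hijacking", true, false), ("brute-force", true, false),
   ("ransomware", true, true), ("port scan", true, true),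
   ("suspicious", true, false), ("authentication failed", true, false),
   ("disk usage", false, false), ("kernel panic", false, true),
   ("application crashed", false, false), ("cpu usage", false, false),
   ("deadlock", false, false), ("timeout", false, false),
   ("ssl", false, false), ("latency", false, false)]

def classify_log_alt (message : String) : Option String × Option String :=
  let ml := PySem.Str.lower message
  let flags := pvKeywords.foldl
    (fun (s : Bool × Bool × Bool × Bool) (r : String × Bool × Bool) =>
      let hit := PySem.Str.isIn r.1 ml
      (s.1 || (r.2.1 && hit),
       s.2.1 || (!r.2.1 && hit),
       s.2.2.1 || (r.2.1 && r.2.2 && hit),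
       s.2.2.2 || (!r.2.1 && r.2.2 && hit)))
    (false, false, false, false)
  let crit := PySem.Str.isIn "critical" ml
  if flags.1 then
    (some "SECURITY ALERT", some (if crit || flags.2.2.1 then "CRITICAL" else "MEDIUM"))
  else if flags.2.1 then
    (some "SYSTEM ALERT", some (if crit || flags.2.2.2 then "CRITICAL" else "MEDIUM"))
  else (none, none)

-- ===== PRECONDITION & SPEC =====
def Spec_classify_log (message : String) (out : Option String × Option String) : Prop := out = classify_log_alt message
instance (message : String) (out : Option String × Option String) : Decidable (Spec_classify_log message out) := by unfold Spec_classify_log; infer_instance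

-- ===== CLAIM (what is proved, stated in full; the proofs are below) =====
def Claim_equal_classify_log : Prop := ∀ (message : String), Dom_classify_log message → Spec_classify_log message (classify_log message)

-- ===== LEMMAS AND PROOFS =====

-- ===== VERDICT (by name: the statement is the Claim_ definition above) =====
theorem classify_log_spec : Claim_equal_classify_log := by
  intro message _
  unfold Spec_classify_log classify_log classify_log_alt pvKeywords
  simp only [List.foldl, List.any_cons, List.any_nil, Bool.and_true, Bool.true_and,
    Bool.false_and, Bool.and_false, Bool.or_false, Bool.false_or, Bool.not_true,
    Bool.not_false, Bool.or_assoc]
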